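-- pv_equiv track=rewrite | github.com/lara-queirogaa/Elementos-trabalho1 | elementos de ia/algoritmos/heurística.py | calculate_grouped_balls_heuristic
-- ===== SOURCE A (Python) =====
-- def calculate_grouped_balls_heuristic(board):
--     """
--     Heurística que conta o número total de bolas do mesmo tipo que estão adjacentes.
--     Quanto maior o valor, melhor o estado do tabuleiro.
--     """
--     grouped_balls = 0
--
--     for shelf in board:
--         if sum(shelf) == 0:  # Prateleira vazia
--             continue
--
--         current_ball = None
--         current_count = 0
--
--         for ball in shelf:
--             if ball == 0:  # Ignorar espaços vazios
--                 continue
--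
--             if ball == current_ball:
--                 current_count += 1
--             else:
--                 if current_count > 1:
--                     grouped_balls += current_count
--                 current_ball = ball
--                 current_count = 1
--
--         # Adicionar o último grupo da prateleira
--         if current_count > 1:
--             grouped_balls += current_count
--
--     return grouped_balls
-- ===== SOURCE B (Python) =====
-- def calculate_grouped_balls_heuristic(board):
--     """
--     Pairwise formulation: after dropping empty slots, every adjacent equal pair
--     contributes 1, plus 1 extra when it opens a new run -- so a run of k equal
--     balls contributes (k-1) + 1 = k, exactly the grouped-ball count.
--     """
--     total = 0
--     for shelf in board:
--         s = [ball for ball in shelf if ball != 0]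
--         prev = None
--         for a, b in zip(s, s[1:]):
--             if a == b:
--                 total += 1
--                 if prev != a:
--                     total += 1
--             prev = a
--     return total
-- ===== Notes on version B (the rewrite author's own statement) =====
-- stated objective: alternative
-- what changed: Replaces A's run-tracking state machine (current_ball/current_count with end-of-run flushes) and its sum(shelf)==0 skip by a stateless pairwise scan over the zero-filtered shelf: each adjacent equal pair adds 1 plus a run-start bonus.
-- intended difference: On boards containing a shelf whose entries sum to 0 yet still hold an adjacent same-type pair after removing zeros (possible only with negative ball values, e.g. [1,1,-2]), A's 'empty shelf' shortcut sum(shelf)==0 skips the shelf and returns a count missing that group, while B counts it; B's value is intended since the shortcut was only meant to detect truly empty shelves. — e.g. on calculate_grouped_balls_heuristic([[1, 1, -2]]): A returns 0, B returns 2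
import Mathlib
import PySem

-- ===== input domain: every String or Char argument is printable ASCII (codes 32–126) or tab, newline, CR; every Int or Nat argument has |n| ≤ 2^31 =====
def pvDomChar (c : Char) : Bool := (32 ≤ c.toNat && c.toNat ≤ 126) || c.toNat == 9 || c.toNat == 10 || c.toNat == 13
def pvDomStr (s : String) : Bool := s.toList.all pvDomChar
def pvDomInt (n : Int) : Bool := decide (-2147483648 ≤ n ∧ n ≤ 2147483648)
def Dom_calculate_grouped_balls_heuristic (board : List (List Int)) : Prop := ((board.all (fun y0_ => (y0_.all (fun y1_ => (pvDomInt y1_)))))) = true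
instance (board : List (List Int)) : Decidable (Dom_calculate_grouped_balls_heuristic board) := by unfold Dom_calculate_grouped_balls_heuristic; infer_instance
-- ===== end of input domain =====

-- B replaces A's run-tracking state machine (and its sum==0 shelf skip) by a stateless
-- pairwise scan over the zero-filtered shelf; alternative formulation, same cost.

-- ===== PORT A =====
-- inner 'for ball in shelf' loop, state = (grouped_balls, current_ball, current_count)
def pvAInner : List Int → Int × Option Int × Int → Int × Option Int × Int
  | [], st => st
  | ball :: rest, (g, cur, cnt) =>
    if ball = 0 then pvAInner rest (g, cur, cnt)
    else if some ball = cur then pvAInner rest (g, cur, cnt + 1)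
    else pvAInner rest ((if 1 < cnt then g + cnt else g), some ball, 1)

-- outer 'for shelf in board' loop, state = grouped_balls
def pvAOuter : List (List Int) → Int → Int
  | [], g => g
  | shelf :: rest, g =>
    if shelf.foldl (· + ·) 0 = 0 then pvAOuter rest g
    else
      match pvAInner shelf (g, none, 0) with
      | (g', _, cnt) => pvAOuter rest (if 1 < cnt then g' + cnt else g')

def calculate_grouped_balls_heuristic (board : List (List Int)) : Int :=
  pvAOuter board 0

-- ===== PORT B =====
-- 'for a, b in zip(s, s[1:])' loop, state = (total, prev)
def pvBPairs : List (Int × Int) → Int × Option Int → Int × Option Int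
  | [], st => st
  | (a, b) :: rest, (total, prev) =>
    pvBPairs rest ((if a = b then total + 1 + (if prev ≠ some a then 1 else 0) else total), some a)

-- outer 'for shelf in board' loop, state = total
def pvBOuter : List (List Int) → Int → Int
  | [], total => total
  | shelf :: rest, total =>
    let s := shelf.filter (fun b => b ≠ 0)
    pvBOuter rest (pvBPairs (List.zip s s.tail) (total, none)).1

def calculate_grouped_balls_heuristic_alt (board : List (List Int)) : Int :=
  pvBOuter board 0

-- ===== PRECONDITION & SPEC =====
-- true iff the shelf contains two equal nonzero entries separated only by zeros
-- (i.e. an adjacent same-type pair once empty slots are ignored); p = last nonzero seen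
def pvHasPair (p : Option Int) : List Int → Bool
  | [] => false
  | x :: t => if x = 0 then pvHasPair p t else if p = some x then true else pvHasPair (some x) t

-- On boards containing a shelf whose entries sum to 0 yet still hold an adjacent same-type
-- pair after ignoring zeros (possible only with negative ball values, e.g. [1,1,-2]), A's
-- 'empty shelf' shortcut sum(shelf)==0 skips the shelf and returns a count missing that
-- group, while B counts it; B's value is intended since the shortcut was only meant to
-- detect truly empty shelves.
def D_calculate_grouped_balls_heuristic (board : List (List Int)) : Prop :=
  ∃ shelf ∈ board, shelf.sum = 0 ∧ pvHasPair none shelf = true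

instance (board : List (List Int)) : Decidable (D_calculate_grouped_balls_heuristic board) := by
  unfold D_calculate_grouped_balls_heuristic; infer_instance

def Spec_calculate_grouped_balls_heuristic (board : List (List Int)) (out : Int) : Prop :=
  ¬ D_calculate_grouped_balls_heuristic board → out = calculate_grouped_balls_heuristic_alt board
instance (board : List (List Int)) (out : Int) : Decidable (Spec_calculate_grouped_balls_heuristic board out) := by
  unfold Spec_calculate_grouped_balls_heuristic; infer_instance

def pvDiffWitness_calculate_grouped_balls_heuristic : List (List Int) := [[1, 1, -2]]
def pvDiffWitnessOut_calculate_grouped_balls_heuristic : Int × Int := (0, 2)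

-- ===== CLAIM (what is proved, stated in full; the proofs are below) =====
def Claim_unchanged_calculate_grouped_balls_heuristic : Prop := ∀ (board : List (List Int)), Dom_calculate_grouped_balls_heuristic board → Spec_calculate_grouped_balls_heuristic board (calculate_grouped_balls_heuristic board)
def Claim_changed_calculate_grouped_balls_heuristic : Prop := Dom_calculate_grouped_balls_heuristic (pvDiffWitness_calculate_grouped_balls_heuristic) ∧ D_calculate_grouped_balls_heuristic (pvDiffWitness_calculate_grouped_balls_heuristic) ∧ calculate_grouped_balls_heuristic (pvDiffWitness_calculate_grouped_balls_heuristic) = pvDiffWitnessOut_calculate_grouped_balls_heuristic.1 ∧ calculate_grouped_balls_heuristic_alt (pvDiffWitness_calculate_grouped_balls_heuristic) = pvDiffWitnessOut_calculate_grouped_balls_heuristic.2 ∧ pvDiffWitnessOut_calculate_grouped_balls_heuristic.1 ≠ pvDiffWitnessOut_calculate_grouped_balls_heuristic.2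
def Claim_exact_calculate_grouped_balls_heuristic : Prop := ∀ (board : List (List Int)), Dom_calculate_grouped_balls_heuristic board → D_calculate_grouped_balls_heuristic board → calculate_grouped_balls_heuristic board ≠ calculate_grouped_balls_heuristic_alt board

-- ===== LEMMAS AND PROOFS =====

-- true iff the list has two adjacent equal elements (proof-side view of pvHasPair)
def pvHasAdjDup : List Int → Bool
  | a :: b :: t => a = b || pvHasAdjDup (b :: t)
  | _ => false

-- pvHasPair with a pending nonzero value c is adjacent-duplication of c :: filtered rest
theorem pvHasPair_some (s : List Int) (c : Int) :
    pvHasPair (some c) s = pvHasAdjDup (c :: s.filter (fun b => b ≠ 0)) := by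
  induction s generalizing c with
  | nil => simp [pvHasPair, pvHasAdjDup]
  | cons x t ih =>
    by_cases hx : x = 0
    · simp [pvHasPair, hx, ih]
    · by_cases hcx : c = x
      · simp [pvHasPair, hx, hcx, pvHasAdjDup, List.filter]
      · simp [pvHasPair, hx, hcx, pvHasAdjDup, List.filter, ih]

-- pvHasPair from scratch is adjacent-duplication of the filtered list
theorem pvHasPair_none (s : List Int) :
    pvHasPair none s = pvHasAdjDup (s.filter (fun b => b ≠ 0)) := by
  induction s with
  | nil => rfl
  | cons x t ih =>
    by_cases hx : x = 0
    · simp [pvHasPair, hx, ih]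
    · simp [pvHasPair, hx, List.filter, pvHasPair_some]

-- the sum A computes by folding is List.sum
theorem pvSum_foldl (l : List Int) : l.foldl (· + ·) 0 = l.sum :=
  Eq.symm List.sum_eq_foldl

-- close A's inner state: the final 'if current_count > 1' flush
def pvAFin (st : Int × Option Int × Int) : Int :=
  match st with | (g, _, cnt) => if 1 < cnt then g + cnt else g

-- the contribution still pending in A's state for a run seen cnt times
def pvP (cnt : Int) : Int := if 1 < cnt then cnt else 0

-- A's inner loop ignores zeros
theorem pvAInner_filter (s : List Int) (st : Int × Option Int × Int) :
    pvAInner s st = pvAInner (s.filter (fun b => b ≠ 0)) st := by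
  induction s generalizing st with
  | nil => rfl
  | cons b t ih =>
    obtain ⟨g, cur, cnt⟩ := st
    by_cases hb : b = 0
    · simp [pvAInner, hb, ih]
    · simp [pvAInner, hb, List.filter, ih]

-- unfold A's outer loop one shelf in the non-skipped case
theorem pvAOuter_cons (shelf : List Int) (rest : List (List Int)) (g : Int)
    (hs : ¬ shelf.foldl (· + ·) 0 = 0) :
    pvAOuter (shelf :: rest) g = pvAOuter rest (pvAFin (pvAInner shelf (g, none, 0))) := by
  simp only [pvAOuter, if_neg hs]
  cases hA : pvAInner shelf (g, none, 0) with
  | mk g' p =>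
    cases p with
    | mk cur cnt => simp [pvAFin]

-- core invariant: A's run state machine vs B's pairwise scan on a zero-free remainder s,
-- with current run value c seen cnt ≥ 1 times and B's prev agreeing with that state
theorem pvMain (s : List Int) (c cnt g : Int) (prev : Option Int)
    (hz : ∀ x ∈ s, x ≠ 0)
    (hst : (cnt = 1 ∧ prev ≠ some c) ∨ (2 ≤ cnt ∧ prev = some c)) :
    pvAFin (pvAInner s (g, some c, cnt))
      = (pvBPairs (List.zip (c :: s) s) (g + pvP cnt, prev)).1 := by
  induction s generalizing c cnt g prev with
  | nil =>
    rcases hst with ⟨h1, _⟩ | ⟨h2, _⟩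
    · simp [pvAInner, pvAFin, pvBPairs, pvP, h1]
    · have h : (1:Int) < cnt := by omega
      simp [pvAInner, pvAFin, pvBPairs, pvP, h]
  | cons b t ih =>
    have hb0 : b ≠ 0 := hz b (by simp)
    have hzt : ∀ x ∈ t, x ≠ 0 := fun x hx => hz x (by simp [hx])
    by_cases hbc : b = c
    · subst hbc
      have h1 : pvAInner (b :: t) (g, some b, cnt) = pvAInner t (g, some b, cnt + 1) := by
        simp [pvAInner, hb0]
      rw [h1, ih b (cnt + 1) g (some b) hzt
        (Or.inr ⟨by rcases hst with ⟨h, _⟩ | ⟨h, _⟩ <;> omega, rfl⟩)]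
      have hzip : List.zip (b :: b :: t) (b :: t) = (b, b) :: List.zip (b :: t) t := rfl
      rw [hzip]
      simp only [pvBPairs]
      have htot : g + pvP cnt + 1 + (if prev ≠ some b then 1 else 0) = g + pvP (cnt + 1) := by
        unfold pvP
        rcases hst with ⟨h1c, h2c⟩ | ⟨h1c, h2c⟩
        · rw [if_pos h2c]
          subst h1c
          split_ifs <;> omega
        · rw [if_neg (show ¬ prev ≠ some b from not_not_intro h2c)]
          split_ifs <;> omega
      rw [htot]
      simp
    · have h1 : pvAInner (b :: t) (g, some c, cnt)
          = pvAInner t ((if 1 < cnt then g + cnt else g), some b, 1) := by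
        simp [pvAInner, hb0, hbc]
      have h2 : (if 1 < cnt then g + cnt else g) = g + pvP cnt := by
        unfold pvP; split <;> omega
      rw [h1, h2, ih b 1 (g + pvP cnt) (some c) hzt
        (Or.inl ⟨rfl, fun h => hbc (Option.some.inj h).symm⟩)]
      have hzip : List.zip (c :: b :: t) (b :: t) = (c, b) :: List.zip (b :: t) t := rfl
      rw [hzip]
      simp only [pvBPairs, if_neg (fun hcb : c = b => hbc hcb.symm)]
      simp [pvP]

-- per-shelf equality (ignoring the sum==0 skip): A's flushed inner loop = B's pairwise scan
theorem pvShelfEqGen (f : List Int) (g : Int) (hz : ∀ x ∈ f, x ≠ 0) :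
    pvAFin (pvAInner f (g, none, 0)) = (pvBPairs (List.zip f f.tail) (g, none)).1 := by
  cases f with
  | nil => simp [pvAInner, pvAFin, pvBPairs]
  | cons b t =>
    have hb0 : b ≠ 0 := hz b (List.Mem.head _)
    have h1 : pvAInner (b :: t) (g, none, 0) = pvAInner t (g, some b, 1) := by
      simp [pvAInner, hb0]
    rw [h1]
    have := pvMain t b 1 g none (fun x hx => hz x (List.Mem.tail _ hx))
      (Or.inl ⟨rfl, by intro h; simp at h⟩)
    simpa [pvP, List.tail] using this

-- per-shelf equality (ignoring the sum==0 skip): A's flushed inner loop = B's pairwise scan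
theorem pvShelfEq (shelf : List Int) (g : Int) :
    pvAFin (pvAInner shelf (g, none, 0))
      = (pvBPairs (List.zip (shelf.filter (fun b => b ≠ 0))
          (shelf.filter (fun b => b ≠ 0)).tail) (g, none)).1 := by
  rw [pvAInner_filter]
  apply pvShelfEqGen
  intro x hx
  simpa using (List.mem_filter.mp hx).2

-- no adjacent duplicate ⇒ B's scan adds nothing
theorem pvNoDup (f : List Int) (g : Int) (prev : Option Int)
    (h : pvHasAdjDup f = false) :
    (pvBPairs (List.zip f f.tail) (g, prev)).1 = g := by
  induction f generalizing g prev with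
  | nil => rfl
  | cons a t ih =>
    cases t with
    | nil => rfl
    | cons b t2 =>
      have hab : ¬ (a = b) := by
        by_contra hc
        simp [pvHasAdjDup, hc] at h
      have ht : pvHasAdjDup (b :: t2) = false := by
        simp only [pvHasAdjDup, Bool.or_eq_false_iff] at h
        exact h.2
      show (pvBPairs ((a, b) :: List.zip (b :: t2) t2) (g, prev)).1 = g
      simp only [pvBPairs, if_neg hab]
      exact ih g (some a) ht

-- B's scan only increases the total
theorem pvBNonneg (ps : List (Int × Int)) (g : Int) (prev : Option Int) :
    g ≤ (pvBPairs ps (g, prev)).1 := by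
  induction ps generalizing g prev with
  | nil => simp [pvBPairs]
  | cons p rest ih =>
    obtain ⟨a, b⟩ := p
    simp only [pvBPairs]
    refine le_trans ?_ (ih _ (some a))
    split_ifs <;> omega

-- B's scan is additive in the starting total
theorem pvBAdd (ps : List (Int × Int)) (g : Int) (prev : Option Int) :
    (pvBPairs ps (g, prev)).1 = g + (pvBPairs ps (0, prev)).1 := by
  induction ps generalizing g prev with
  | nil => simp [pvBPairs]
  | cons p rest ih =>
    obtain ⟨a, b⟩ := p
    by_cases hab : a = b
    · by_cases hp : prev ≠ some a
      · simp only [pvBPairs, if_pos hab, if_pos hp]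
        rw [ih (g + 1 + 1) (some a), ih (0 + 1 + 1) (some a)]
        try ring
      · simp only [pvBPairs, if_pos hab, if_neg hp]
        rw [ih (g + 1 + 0) (some a), ih (0 + 1 + 0) (some a)]
        try ring
    · simp only [pvBPairs, if_neg hab]
      rw [ih g (some a), ih 0 (some a)]
      try ring
    
-- an adjacent duplicate ⇒ B's scan adds at least one
theorem pvDupPos (f : List Int) (g : Int) (prev : Option Int)
    (h : pvHasAdjDup f = true) :
    g + 1 ≤ (pvBPairs (List.zip f f.tail) (g, prev)).1 := by
  induction f generalizing g prev with
  | nil => simp [pvHasAdjDup] at h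
  | cons a t ih =>
    cases t with
    | nil => simp [pvHasAdjDup] at h
    | cons b t2 =>
      show g + 1 ≤ (pvBPairs ((a, b) :: List.zip (b :: t2) t2) (g, prev)).1
      by_cases hab : a = b
      · simp only [pvBPairs, if_pos hab]
        refine le_trans ?_ (pvBNonneg _ _ (some a))
        split_ifs <;> omega
      · have ht : pvHasAdjDup (b :: t2) = true := by
          simp only [pvHasAdjDup, Bool.or_eq_true_iff, decide_eq_true_eq] at h ⊢
          tauto
        simp only [pvBPairs, if_neg hab]
        exact ih g (some a) ht

-- A's total strictly trails B's total whenever its accumulator strictly trails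
theorem pvOuterLt (board : List (List Int)) (g g' : Int) (h : g < g') :
    pvAOuter board g < pvBOuter board g' := by
  induction board generalizing g g' with
  | nil => simpa [pvAOuter, pvBOuter]
  | cons shelf rest ih =>
    by_cases hs : shelf.foldl (· + ·) 0 = 0
    · simp only [pvAOuter, pvBOuter, if_pos hs]
      exact ih g _ (lt_of_lt_of_le h (pvBNonneg _ _ _))
    · rw [pvAOuter_cons _ _ _ hs]
      simp only [pvBOuter]
      apply ih
      rw [pvShelfEq, pvBAdd _ g, pvBAdd _ g']
      omega

-- A = B outside D_ (both outer loops, any common accumulator)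
theorem pvUnchangedAux (board : List (List Int)) (g : Int)
    (h : ¬ D_calculate_grouped_balls_heuristic board) :
    pvAOuter board g = pvBOuter board g := by
  induction board generalizing g with
  | nil => rfl
  | cons shelf rest ih =>
    have hrest : ¬ D_calculate_grouped_balls_heuristic rest := by
      intro ⟨s, hs, hp⟩
      exact h ⟨s, by simp [hs], hp⟩
    by_cases hs : shelf.foldl (· + ·) 0 = 0
    · have hdup : pvHasAdjDup (shelf.filter (fun b => b ≠ 0)) = false := by
        by_contra hc
        exact h ⟨shelf, by simp, by rw [← pvSum_foldl]; exact hs,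
          by rw [pvHasPair_none]; simpa using hc⟩
      simp only [pvAOuter, pvBOuter, if_pos hs]
      rw [ih _ hrest, pvNoDup _ _ _ hdup]
    · rw [pvAOuter_cons _ _ _ hs]
      simp only [pvBOuter]
      rw [pvShelfEq, ih _ hrest]

-- A < B inside D_
theorem pvTightAux (board : List (List Int)) (g g' : Int) (hle : g ≤ g')
    (hD : D_calculate_grouped_balls_heuristic board) :
    pvAOuter board g < pvBOuter board g' := by
  induction board generalizing g g' with
  | nil => exact absurd hD (by intro ⟨s, hs, _⟩; simp at hs)
  | cons shelf rest ih =>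
    obtain ⟨s, hs, hsum, hdup⟩ := hD
    by_cases hskip : shelf.foldl (· + ·) 0 = 0
    · simp only [pvAOuter, pvBOuter, if_pos hskip]
      by_cases hd : pvHasAdjDup (shelf.filter (fun b => b ≠ 0)) = true
      · exact pvOuterLt rest g _ (lt_of_lt_of_le (by omega) (pvDupPos _ _ _ hd))
      · have hDrest : D_calculate_grouped_balls_heuristic rest := by
          rcases List.mem_cons.mp hs with heq | hmem
          · subst heq
            exact absurd (by rw [← pvHasPair_none]; exact hdup) hd
          · exact ⟨s, hmem, hsum, hdup⟩
        exact ih _ _ (le_trans hle (pvBNonneg _ _ _)) hDrest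
    · have hDrest : D_calculate_grouped_balls_heuristic rest := by
        rcases List.mem_cons.mp hs with heq | hmem
        · subst heq
          exact absurd (by rw [pvSum_foldl]; exact hsum) hskip
        · exact ⟨s, hmem, hsum, hdup⟩
      rw [pvAOuter_cons _ _ _ hskip]
      simp only [pvBOuter]
      refine ih _ _ ?_ hDrest
      rw [pvShelfEq, pvBAdd _ g, pvBAdd _ g']
      omega

-- ===== VERDICT (by name: the statement is the Claim_ definition above) =====
theorem calculate_grouped_balls_heuristic_spec : Claim_unchanged_calculate_grouped_balls_heuristic := by
  intro board _ hnd
  unfold calculate_grouped_balls_heuristic calculate_grouped_balls_heuristic_alt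
  exact pvUnchangedAux board 0 hnd

theorem calculate_grouped_balls_heuristic_changed : Claim_changed_calculate_grouped_balls_heuristic := by
  unfold Claim_changed_calculate_grouped_balls_heuristic; decide

theorem calculate_grouped_balls_heuristic_tight : Claim_exact_calculate_grouped_balls_heuristic := by
  intro board _ hD
  unfold calculate_grouped_balls_heuristic calculate_grouped_balls_heuristic_alt
  exact ne_of_lt (pvTightAux board 0 0 le_rfl hD)
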